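-- pv_equiv track=rewrite | github.com/mariembm2005/mariembm2005 | tictactoe.py | loli
-- ===== SOURCE A (Python) =====
-- def loli(m,n):
--     c = 1
--     for i in range(3):
--         for j in range(3):
--             if(c==n):
--                 return i
--             else:
--                 c+=1
-- ===== SOURCE B (Python) =====
-- def loli(m, n):
--     if n in range(1, 10):
--         return (int(n) - 1) // 3
-- ===== Notes on version B (the rewrite author's own statement) =====
-- stated objective: simpler
-- what changed: Replaces the nested 3x3 counting loop with a closed-form row formula (n-1)//3 guarded by a range membership test.
import Mathlib
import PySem

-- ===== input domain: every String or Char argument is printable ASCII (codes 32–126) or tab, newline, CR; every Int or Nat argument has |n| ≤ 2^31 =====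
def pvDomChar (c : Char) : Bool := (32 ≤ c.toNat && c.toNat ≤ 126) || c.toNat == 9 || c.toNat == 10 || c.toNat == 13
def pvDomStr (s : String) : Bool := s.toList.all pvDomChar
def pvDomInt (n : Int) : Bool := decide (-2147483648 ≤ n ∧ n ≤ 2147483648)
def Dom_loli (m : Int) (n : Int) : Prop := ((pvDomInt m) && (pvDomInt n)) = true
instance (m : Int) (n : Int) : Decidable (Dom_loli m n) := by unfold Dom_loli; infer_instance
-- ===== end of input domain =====

-- B replaces A's nested 3x3 counting loop with the closed-form row formula (n-1)//3 (objective: simpler).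

-- ===== PORT A =====
-- A: c = 1; for i in range(3): for j in range(3): if c == n: return i else c += 1; (falls off → None)
-- state = (c, early-return result); once the result is set, the remaining iterations are skipped
def loli (m : Int) (n : Int) : Option Int :=
  ((PySem.List.pyRange 0 3 1).foldl
    (fun (st : Int × Option Int) (i : Int) =>
      (PySem.List.pyRange 0 3 1).foldl
        (fun (st2 : Int × Option Int) (_j : Int) =>
          if st2.2.isSome then st2
          else if st2.1 = n then (st2.1, some i) else (st2.1 + 1, none))
        st)
    (1, none)).2

-- ===== PORT B =====
-- B: if n in range(1,10): return (int(n)-1)//3  (implicit None otherwise)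
def loli_alt (m : Int) (n : Int) : Option Int :=
  if 1 ≤ n ∧ n ≤ 9 then some (PySem.Int.floordiv (n - 1) 3) else none

-- ===== PRECONDITION & SPEC =====
def Spec_loli (m : Int) (n : Int) (out : Option Int) : Prop := out = loli_alt m n
instance (m : Int) (n : Int) (out : Option Int) : Decidable (Spec_loli m n out) := by unfold Spec_loli; infer_instance

-- ===== CLAIM (what is proved, stated in full; the proofs are below) =====
def Claim_equal_loli : Prop := ∀ (m : Int) (n : Int), Dom_loli m n → Spec_loli m n (loli m n)

-- ===== LEMMAS AND PROOFS =====

-- ===== VERDICT (by name: the statement is the Claim_ definition above) =====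
theorem loli_spec : Claim_equal_loli := by
  intro m n _
  show loli m n = loli_alt m n
  by_cases h : 1 ≤ n ∧ n ≤ 9
  · obtain ⟨h1, h2⟩ := h
    interval_cases n <;> simp [loli, loli_alt, PySem.List.pyRange] <;> decide
  · have e1 : (1:Int) ≠ n := by omega
    have e2 : (2:Int) ≠ n := by omega
    have e3 : (3:Int) ≠ n := by omega
    have e4 : (4:Int) ≠ n := by omega
    have e5 : (5:Int) ≠ n := by omega
    have e6 : (6:Int) ≠ n := by omega
    have e7 : (7:Int) ≠ n := by omega
    have e8 : (8:Int) ≠ n := by omega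
    have e9 : (9:Int) ≠ n := by omega
    simp [loli, loli_alt, PySem.List.pyRange, List.range_succ, h, e1, e2, e3, e4, e5, e6, e7, e8, e9]
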